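-- pv_equiv track=rewrite | github.com/amorse25/GeneticAlgorithm-CSC535- | hw3.py | fix_repeating_zeros
-- ===== SOURCE A (Python) =====
-- def fix_repeating_zeros(length, chromes):
--     for k in range(len(chromes)):
--         chromes[k][0] = 1       # start position at 0 for a hit (1)
--         chromes[k][length - 1] = 1 # end at last index
--         previous = chromes[k][0]    # previous index
--         index = 1
--         for num in chromes[k][1:]:
--             if num == previous and num == 0:    # if two 0's are found
--                 chromes[k][index] = 1           # replace one 0 with a 1
--             previous = num
--             index += 1
--     return chromes
-- ===== SOURCE B (Python) =====
-- def fix_repeating_zeros(length, chromes):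
--     # Run-grouping rebuild: same endpoints fix, then each maximal run of zeros
--     # becomes one 0 followed by ones; rows are rebuilt and written back in place.
--     for row in chromes:
--         row[0] = 1
--         row[length - 1] = 1
--         out = []
--         i = 0
--         n = len(row)
--         while i < n:
--             if row[i] == 0:
--                 j = i
--                 while j < n and row[j] == 0:
--                     j += 1
--                 out.append(0)
--                 out.extend([1] * (j - i - 1))
--                 i = j
--             else:
--                 out.append(row[i])
--                 i += 1
--         row[:] = out
--     return chromes
-- ===== Notes on version B (the rewrite author's own statement) =====
-- stated objective: alternative
-- what changed: B rebuilds each row by grouping maximal runs of zeros (emit one 0 then ones per run) instead of A's previous-value scan writing into the row index by index.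
import Mathlib
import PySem

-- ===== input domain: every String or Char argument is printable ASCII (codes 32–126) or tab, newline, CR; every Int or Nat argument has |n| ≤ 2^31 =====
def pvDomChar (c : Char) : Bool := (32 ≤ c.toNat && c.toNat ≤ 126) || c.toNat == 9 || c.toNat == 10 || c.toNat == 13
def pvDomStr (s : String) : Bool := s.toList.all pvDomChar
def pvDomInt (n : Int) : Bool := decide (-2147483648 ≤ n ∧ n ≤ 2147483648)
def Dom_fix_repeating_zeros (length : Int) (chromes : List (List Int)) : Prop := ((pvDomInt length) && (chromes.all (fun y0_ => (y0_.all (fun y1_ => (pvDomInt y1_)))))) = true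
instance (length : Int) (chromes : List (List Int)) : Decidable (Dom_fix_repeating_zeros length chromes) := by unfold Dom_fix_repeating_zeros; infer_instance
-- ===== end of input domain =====

-- B rebuilds each row by grouping maximal runs of zeros instead of A's previous-value scan
-- (alternative decomposition, same cost); both Pythons mutate the rows in place identically,
-- the equivalence proved here is about the return value.


-- ===== PORT A =====
-- one row of A's outer loop: row[0]=1; row[length-1]=1; then the previous/index scan
-- over the snapshot row[1:], writing 1 over the second of two consecutive zeros
def pvFixRowA (length : Int) (row : List Int) : List Int :=
  let r1 := PySem.List.pySetD row 0 1
  let r2 := PySem.List.pySetD r1 (length - 1) 1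
  let previous := PySem.List.pyGetD r2 0 0
  let s := PySem.List.slice r2 (some 1) none
  (s.foldl (fun (st : List Int × Int × Int) num =>
      let r := st.1
      let prev := st.2.1
      let idx := st.2.2
      let r' := if num = prev ∧ num = 0 then PySem.List.pySetD r idx 1 else r
      (r', num, idx + 1)) (r2, previous, 1)).1

def fix_repeating_zeros (length : Int) (chromes : List (List Int)) : List (List Int) :=
  chromes.map (pvFixRowA length)

-- ===== PORT B =====
-- rebuild a row: runs of zeros become a single 0 followed by ones, everything else passes through
def pvRebuild : List Int → List Int
  | [] => []
  | x :: xs =>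
    if x = 0 then
      let zs := xs.takeWhile (· == 0)
      let rest := xs.dropWhile (· == 0)
      0 :: (List.replicate zs.length 1 ++ pvRebuild rest)
    else x :: pvRebuild xs
  termination_by xs => xs.length
  decreasing_by
  · exact Nat.lt_succ_of_le (List.length_dropWhile_le _ _)
  · exact Nat.lt_succ_self _

def pvFixRowB (length : Int) (row : List Int) : List Int :=
  pvRebuild (PySem.List.pySetD (PySem.List.pySetD row 0 1) (length - 1) 1)

def fix_repeating_zeros_alt (length : Int) (chromes : List (List Int)) : List (List Int) :=
  chromes.map (pvFixRowB length)

-- ===== PRECONDITION & SPEC =====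
-- exactly where Python A returns: every row nonempty (row[0]=1) and length-1 a valid
-- Python index into it (row[length-1]=1); otherwise A raises IndexError
def Pre_fix_repeating_zeros (length : Int) (chromes : List (List Int)) : Prop :=
  ∀ row ∈ chromes, row ≠ [] ∧ PySem.Raise.InRange row.length (length - 1)
instance (length : Int) (chromes : List (List Int)) : Decidable (Pre_fix_repeating_zeros length chromes) := by unfold Pre_fix_repeating_zeros; infer_instance

def pvWitness_fix_repeating_zeros : Int × List (List Int) := (4, [[0, 0, 0, 0], [1, 0, 0, 1]])

def Spec_fix_repeating_zeros (length : Int) (chromes : List (List Int)) (out : List (List Int)) : Prop := out = fix_repeating_zeros_alt length chromes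
instance (length : Int) (chromes : List (List Int)) (out : List (List Int)) : Decidable (Spec_fix_repeating_zeros length chromes out) := by unfold Spec_fix_repeating_zeros; infer_instance

-- ===== CLAIM (what is proved, stated in full; the proofs are below) =====
def Claim_equal_fix_repeating_zeros : Prop := ∀ (length : Int) (chromes : List (List Int)), Dom_fix_repeating_zeros length chromes → Pre_fix_repeating_zeros length chromes → Spec_fix_repeating_zeros length chromes (fix_repeating_zeros length chromes)

-- ===== LEMMAS AND PROOFS =====

-- pure characterisation of what both row passes compute after the endpoints are set:
-- given the previous snapshot value, a zero following a zero becomes 1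
def pvMark (prev : Int) : List Int → List Int
  | [] => []
  | x :: xs => (if x = prev ∧ x = 0 then 1 else x) :: pvMark x xs

theorem pvFoldA_eq_mark (s : List Int) : ∀ (cur : List Int) (n : Nat) (prev : Int),
    cur.drop n = s →
    (s.foldl (fun (st : List Int × Int × Int) num =>
      let r := st.1
      let prev := st.2.1
      let idx := st.2.2
      let r' := if num = prev ∧ num = 0 then PySem.List.pySetD r idx 1 else r
      (r', num, idx + 1)) (cur, prev, (n : Int))).1 = cur.take n ++ pvMark prev s := by
  induction s with
  | nil =>
    intro cur n prev h
    simp only [List.foldl_nil, pvMark, List.append_nil]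
    have hlen : cur.length ≤ n := by
      by_contra hlt
      have := List.drop_eq_nil_iff.mp h
      omega
    exact (List.take_of_length_le hlen).symm
  | cons x s' ih =>
    intro cur n prev h
    have hn : n < cur.length := by
      by_contra hge
      rw [List.drop_eq_nil_of_le (by omega)] at h
      simp at h
    have hx' : cur[n]? = some x := by
      have h0 := congrArg (fun l : List Int => l[0]?) h
      simpa [List.getElem?_drop] using h0
    have hx : cur[n] = x := by
      rw [List.getElem?_eq_getElem hn] at hx'
      exact Option.some.inj hx'
    set cur' := if x = prev ∧ x = 0 then PySem.List.pySetD cur (n : Int) 1 else cur with hcur'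
    have hset : cur' = if x = prev ∧ x = 0 then cur.set n 1 else cur := by
      rw [hcur']
      split_ifs
      · exact PySem.List.pySetD_natCast cur n 1
      · rfl
    have hdrop : cur'.drop (n + 1) = s' := by
      rw [hset]
      split_ifs
      · have hds : (cur.set n 1).drop (n + 1) = cur.drop (n + 1) := by
          rw [List.drop_set]
          simp
        rw [hds]
        have := congrArg (List.drop 1) h
        simpa [List.drop_drop, Nat.add_comm] using this
      · have := congrArg (List.drop 1) h
        simpa [List.drop_drop, Nat.add_comm] using this
    have htake : cur'.take (n + 1) = cur.take n ++ [if x = prev ∧ x = 0 then 1 else x] := by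
      rw [List.take_succ]
      have h1 : cur'.take n = cur.take n := by
        rw [hset]; split_ifs
        · rw [List.take_set]
          exact List.set_eq_of_length_le (by simp)
        · rfl
      have h2 : cur'[n]? = some (if x = prev ∧ x = 0 then 1 else x) := by
        rw [hset]
        split_ifs with hc
        · simp [List.getElem?_set, hn, hc]
        · simp [List.getElem?_eq_getElem hn, hx, hc]
      rw [h1, h2]
      rfl
    simp only [List.foldl_cons]
    have hih := ih cur' (n + 1) x hdrop
    have hcast : ((n : Int) + 1) = ((n + 1 : Nat) : Int) := by push_cast; ring
    simp only [pvMark]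
    calc (List.foldl _ (cur', x, (n : Int) + 1) s').1
        = cur'.take (n + 1) ++ pvMark x s' := by rw [hcast]; exact hih
      _ = cur.take n ++ ((if x = prev ∧ x = 0 then 1 else x) :: pvMark x s') := by
          rw [htake, List.append_assoc]; rfl

theorem pvMark_zero_run (xs : List Int) :
    pvMark 0 xs = List.replicate (xs.takeWhile (· == 0)).length 1 ++ pvMark 0 (xs.dropWhile (· == 0)) := by
  induction xs with
  | nil => simp [pvMark]
  | cons y ys ih =>
    by_cases hy : y = 0
    · subst hy
      simp only [pvMark, List.takeWhile_cons, List.dropWhile_cons]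
      norm_num
      simpa [List.replicate_succ, pvMark] using ih
    · simp [pvMark, hy]

theorem pvRebuild_eq_mark (n : Nat) : ∀ (x : Int) (xs : List Int), xs.length ≤ n →
    pvRebuild (x :: xs) = x :: pvMark x xs := by
  induction n with
  | zero =>
    intro x xs h
    have hxs : xs = [] := List.eq_nil_of_length_eq_zero (by omega)
    subst hxs
    by_cases hx : x = 0 <;> simp [pvRebuild, pvMark, hx]
  | succ n ih =>
    intro x xs h
    by_cases hx : x = 0
    · subst hx
      rw [pvRebuild]
      simp only [if_pos rfl]
      rw [pvMark_zero_run]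
      congr 1
      rcases hd : xs.dropWhile (· == 0) with _ | ⟨y, ys⟩
      · simp [pvRebuild, pvMark]
      · have hy : ¬ (y = 0) := by
          have := List.dropWhile_get_zero_not (· == 0) xs (by simp [hd])
          simp [hd] at this
          exact this
        have hlen : ys.length ≤ n := by
          have h1 := List.length_dropWhile_le (· == 0) xs
          rw [hd] at h1
          simp at h1
          omega
        rw [ih y ys hlen]
        simp [pvMark, hy]
    · rw [pvRebuild]
      simp only [if_neg hx]
      congr 1
      rcases xs with _ | ⟨y, ys⟩
      · simp [pvRebuild, pvMark]
      · rw [ih y ys (by simp at h; omega)]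
        simp only [pvMark]
        have hcond : ¬ (y = x ∧ y = 0) := by
          rintro ⟨h1, h2⟩
          exact hx (h1.symm.trans h2)
        rw [if_neg hcond]

theorem pvRow_core (r2 : List Int) :
    ((PySem.List.slice r2 (some 1) none).foldl (fun (st : List Int × Int × Int) num =>
      let r := st.1
      let prev := st.2.1
      let idx := st.2.2
      let r' := if num = prev ∧ num = 0 then PySem.List.pySetD r idx 1 else r
      (r', num, idx + 1)) (r2, PySem.List.pyGetD r2 0 0, 1)).1 = pvRebuild r2 := by
  rcases r2 with _ | ⟨h, t⟩
  · simp [PySem.List.slice, PySem.List.pyGetD, PySem.List.pyIdx?, pvRebuild]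
  · have hslice : PySem.List.slice (h :: t) (some 1) none = t := by
      rw [PySem.List.slice_from_one]
      rfl
    have hget : PySem.List.pyGetD (h :: t) (0 : Int) 0 = h := PySem.List.pyGetD_zero_cons h t 0
    rw [hslice, hget]
    have hfold := pvFoldA_eq_mark t (h :: t) 1 h (by simp)
    simp only [Nat.cast_one] at hfold
    rw [hfold, pvRebuild_eq_mark t.length h t le_rfl]
    simp

theorem pvFixRow_eq (length : Int) (row : List Int) :
    pvFixRowA length row = pvFixRowB length row :=
  pvRow_core (PySem.List.pySetD (PySem.List.pySetD row 0 1) (length - 1) 1)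

-- ===== VERDICT (by name: the statement is the Claim_ definition above) =====
theorem fix_repeating_zeros_spec : Claim_equal_fix_repeating_zeros := by
  intro length chromes _ _
  unfold Spec_fix_repeating_zeros fix_repeating_zeros fix_repeating_zeros_alt
  exact List.map_congr_left (fun row _ => pvFixRow_eq length row)
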